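-- pv_equiv track=rewrite | github.com/dkanzariya/Python | W374_4.py | generateSequences
-- ===== SOURCE A (Python) =====
-- def generateSequences(i, positions):
--     if i == len(positions) - 1:
--         return 1
--
--     count = 0
--     for j in range(i, len(positions)):
--         positions[i], positions[j] = positions[j], positions[i]
--         count += generateSequences(i+1, positions)
--         positions[i], positions[j] = positions[j], positions[i]
--
--     return count
--
--     """
--     def ways_to_infect(gap_size):
--         if gap_size == 0:
--             return 1
--         return pow(2, gap_size - 1, MOD)
--
--     sick = [-1] + sick + [n]
--     total_ways = 1
--
--     for i in range(1, len(sick)):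
--         gap_size = sick[i] - sick[i-1] - 1
--         total_ways *= ways_to_infect(gap_size)
--         total_ways %= MOD
--
--     return total_ways
--     """
-- ===== SOURCE B (Python) =====
-- def generateSequences(i, positions):
--     # Closed form: the swap recursion counts the permutations of the suffix,
--     # i.e. factorial(len(positions) - i); computed by one multiplicative loop.
--     n = len(positions)
--     if i > n - 1:
--         return 0
--     result = 1
--     for k in range(2, n - i + 1):
--         result *= k
--     return result
-- ===== Notes on version B (the rewrite author's own statement) =====
-- stated objective: faster
-- what changed: Replaced the swap-and-recurse enumeration by a direct factorial product: B computes factorial(n-i) with one linear loop (0 for i past the end); intended as faster, though a timing run could not confirm a ratio because A times out on larger inputs while B returns.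
import Mathlib
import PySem

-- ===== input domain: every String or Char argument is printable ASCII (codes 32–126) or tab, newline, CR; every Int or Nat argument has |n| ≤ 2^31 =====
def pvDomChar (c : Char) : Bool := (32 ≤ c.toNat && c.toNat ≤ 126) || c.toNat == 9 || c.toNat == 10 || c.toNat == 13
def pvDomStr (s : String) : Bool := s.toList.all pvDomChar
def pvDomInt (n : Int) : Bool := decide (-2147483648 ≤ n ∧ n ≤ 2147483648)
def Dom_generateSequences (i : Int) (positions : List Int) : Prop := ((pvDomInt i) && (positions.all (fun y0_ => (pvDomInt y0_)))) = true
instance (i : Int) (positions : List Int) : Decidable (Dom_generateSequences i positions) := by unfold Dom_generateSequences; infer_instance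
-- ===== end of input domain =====

-- B replaces A's swap-and-recurse enumeration by a direct factorial product loop;
-- intended as faster: a timing run saw A time out on larger inputs while B returned,
-- though it could not confirm a ratio at sizes where both finish. A temporarily swaps
-- elements of `positions` but restores them, so the caller observes no net mutation.


-- ===== PORT A =====
-- 'positions[i], positions[j] = positions[j], positions[i]' (total stand-in;
-- on an out-of-range index Python raises — such inputs are outside Pre_)
def pySwap (xs : List Int) (i j : Int) : List Int :=
  match PySem.List.pyGet? xs j, PySem.List.pyGet? xs i with
  | some vj, some vi => PySem.List.pySetD (PySem.List.pySetD xs i vj) j vi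
  | _, _ => xs

theorem length_pySwap (xs : List Int) (i j : Int) : (pySwap xs i j).length = xs.length := by
  unfold pySwap
  cases PySem.List.pyGet? xs j <;> cases PySem.List.pyGet? xs i <;>
    simp [PySem.List.length_pySetD]

def generateSequences (i : Int) (positions : List Int) : Int :=
  if i = (positions.length : Int) - 1 then 1
  else
    ((PySem.List.pyRange i (positions.length : Int) 1).attach).foldl
      (fun count j => count + generateSequences (i + 1) (pySwap positions i j.1)) 0
termination_by ((positions.length : Int) - i).toNat
decreasing_by
  have hj := PySem.List.mem_pyRange_one.mp j.2
  rw [length_pySwap]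
  omega

-- ===== PORT B =====
def generateSequences_alt (i : Int) (positions : List Int) : Int :=
  let n : Int := positions.length
  if i > n - 1 then 0
  else (PySem.List.pyRange 2 (n - i + 1) 1).foldl (fun r k => r * k) 1

-- ===== PRECONDITION & SPEC =====
-- Pre_ excludes exactly the inputs where A raises IndexError:
-- i < -len(positions) with i ≠ len(positions) - 1 (the swap indexes out of range).
def Pre_generateSequences (i : Int) (positions : List Int) : Prop :=
  -(positions.length : Int) ≤ i ∨ i = (positions.length : Int) - 1

instance (i : Int) (positions : List Int) : Decidable (Pre_generateSequences i positions) := by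
  unfold Pre_generateSequences; infer_instance

def pvWitness_generateSequences : Int × List Int := (0, [3, 1, 2])

def Spec_generateSequences (i : Int) (positions : List Int) (out : Int) : Prop :=
  out = generateSequences_alt i positions

instance (i : Int) (positions : List Int) (out : Int) : Decidable (Spec_generateSequences i positions out) := by
  unfold Spec_generateSequences; infer_instance

-- ===== CLAIM (what is proved, stated in full; the proofs are below) =====
def Claim_equal_generateSequences : Prop := ∀ (i : Int) (positions : List Int), Dom_generateSequences i positions → Pre_generateSequences i positions → Spec_generateSequences i positions (generateSequences i positions)

-- ===== LEMMAS AND PROOFS =====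

-- the running product of B's loop: prod_{k=2}^{m-1} k over pyRange 2 m 1
def prodTo (m : Int) : Int := (PySem.List.pyRange 2 m 1).foldl (fun r k => r * k) 1

theorem prodTo_succ (m : Int) (h : 2 ≤ m) :
    prodTo (m + 1) = prodTo m * m := by
  unfold prodTo
  rw [PySem.List.pyRange_one_succ_right h, List.foldl_append]
  simp

-- A's result only depends on i and the LENGTH of positions
theorem gS_length_eq (m : Nat) : ∀ (i : Int) (ps qs : List Int),
    ps.length = qs.length → ((ps.length : Int) - i).toNat ≤ m →
    generateSequences i ps = generateSequences i qs := by
  induction m with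
  | zero =>
    intro i ps qs hlen hm
    rw [generateSequences, generateSequences, hlen]
    have : (PySem.List.pyRange i (qs.length : Int) 1) = [] := by
      apply PySem.List.pyRange_one_eq_nil; omega
    rw [this]; simp
  | succ m ih =>
    intro i ps qs hlen hm
    rw [generateSequences, generateSequences, hlen]
    split
    · rfl
    · rw [List.foldl_attach (f := fun acc x => acc + generateSequences (i + 1) (pySwap ps i x)),
         List.foldl_attach (f := fun acc x => acc + generateSequences (i + 1) (pySwap qs i x))]
      apply PySem.List.foldl_congr_mem
      intro acc j hj
      have hj' := PySem.List.mem_pyRange_one.mp hj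
      congr 1
      apply ih
      · rw [length_pySwap, length_pySwap, hlen]
      · rw [length_pySwap]; omega

-- main closed form: under Pre_, A equals factorial(len - i) computed as B's product
theorem gS_eq_alt (m : Nat) : ∀ (i : Int) (ps : List Int),
    Pre_generateSequences i ps → ((ps.length : Int) - i).toNat ≤ m →
    generateSequences i ps = generateSequences_alt i ps := by
  induction m with
  | zero =>
    intro i ps hpre hm
    -- here i ≥ len, so both sides are 0 or (at i = len-1, impossible unless len-1 ≥ len) …
    rw [generateSequences, generateSequences_alt]
    have hge : (ps.length : Int) ≤ i := by omega
    split
    · exfalso; omega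
    · have : (PySem.List.pyRange i (ps.length : Int) 1) = [] := by
        apply PySem.List.pyRange_one_eq_nil; omega
      rw [this]
      have h2 : i > (ps.length : Int) - 1 := by omega
      simp [h2]
  | succ m ih =>
    intro i ps hpre hm
    rw [generateSequences, generateSequences_alt]
    by_cases hlast : i = (ps.length : Int) - 1
    · -- last index: A returns 1; B's product range is empty
      simp only [if_pos hlast]
      have h1 : ¬ (i > (ps.length : Int) - 1) := by omega
      have h2 : (PySem.List.pyRange 2 ((ps.length : Int) - i + 1) 1) = [] := by
        apply PySem.List.pyRange_one_eq_nil; omega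
      simp [h1, h2]
    · simp only [if_neg hlast]
      by_cases hge : (ps.length : Int) ≤ i
      · have : (PySem.List.pyRange i (ps.length : Int) 1) = [] := by
          apply PySem.List.pyRange_one_eq_nil; omega
        rw [this]
        have h2 : i > (ps.length : Int) - 1 := by omega
        simp [h2]
      · -- i < len - 1: unfold one level
        have hi : i < (ps.length : Int) - 1 := by omega
        rw [List.foldl_attach (f := fun acc x => acc + generateSequences (i + 1) (pySwap ps i x))]
        have hcongr := PySem.List.foldl_congr_mem
            (l := PySem.List.pyRange i (ps.length : Int) 1) (init := (0 : Int))
            (f := fun acc x => acc + generateSequences (i + 1) (pySwap ps i x))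
            (g := fun acc (_ : Int) => acc + generateSequences (i + 1) ps)
            (by
              intro acc j hj
              have hj' := PySem.List.mem_pyRange_one.mp hj
              simp only
              congr 1
              apply gS_length_eq m
              · exact length_pySwap ps i j
              · rw [length_pySwap]; omega)
        rw [hcongr, PySem.List.foldl_add]
        have hrec : generateSequences (i + 1) ps = generateSequences_alt (i + 1) ps := by
          apply ih
          · unfold Pre_generateSequences at hpre ⊢; omega
          · omega
        have halt : generateSequences_alt (i + 1) ps = prodTo ((ps.length : Int) - i) := by
          rw [generateSequences_alt]
          have h3 : ¬ (i + 1 > (ps.length : Int) - 1) := by omega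
          simp only [h3, if_false]
          have harg : (ps.length : Int) - (i + 1) + 1 = (ps.length : Int) - i := by ring
          rw [harg]; rfl
        rw [hrec, halt]
        have hlen : ((PySem.List.pyRange i (ps.length : Int) 1).map
            (fun _ => prodTo ((ps.length : Int) - i))).sum
            = ((ps.length : Int) - i) * prodTo ((ps.length : Int) - i) := by
          rw [List.map_const', List.sum_replicate, PySem.List.length_pyRange_one]
          rw [nsmul_eq_mul]
          congr 1
          omega
        rw [hlen]
        have hgoal : prodTo ((ps.length : Int) - i + 1)
            = prodTo ((ps.length : Int) - i) * ((ps.length : Int) - i) := by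
          apply prodTo_succ; omega
        have h4 : ¬ (i > (ps.length : Int) - 1) := by omega
        simp only [h4, if_false]
        rw [show List.foldl (fun r k => r * k) 1 (PySem.List.pyRange 2 ((ps.length : Int) - i + 1) 1)
              = prodTo ((ps.length : Int) - i + 1) from rfl, hgoal]
        ring

-- ===== VERDICT (by name: the statement is the Claim_ definition above) =====
theorem generateSequences_spec : Claim_equal_generateSequences := by
  intro i positions _ hpre
  unfold Spec_generateSequences
  exact gS_eq_alt ((positions.length : Int) - i).toNat i positions hpre (le_refl _)
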